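-- pv_equiv track=rewrite | github.com/Kiom87/python_codespace | Nested Loops/C/shorten_longwords.py | shorten_long_words
-- ===== SOURCE A (Python) =====
-- def shorten_long_words(sentence: str) -> str:
--     vowels = set("aeiouAEIOU")
--     result = []
--     word = []
--
--     def flush_word():
--         # Process the current buffered word (letters only)
--         if not word:
--             return
--         w = "".join(word)
--         if len(w) > 4:
--             # Remove vowels
--             processed = "".join(ch for ch in w if ch not in vowels)
--         else:
--             processed = w
--         result.append(processed)
--         word.clear()
--
--     for ch in sentence:
--         if ch.isalpha():
--             word.append(ch)
--         else:
--             # Non-letter encountered: flush current word, then add the character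
--             flush_word()
--             result.append(ch)
--
--     # Flush any remaining word at the end
--     flush_word()
--
--     return "".join(result)
-- ===== SOURCE B (Python) =====
-- def shorten_long_words(sentence: str) -> str:
--     vowels = set("aeiouAEIOU")
--     out = []
--     i, n = 0, len(sentence)
--     while i < n:
--         if sentence[i].isalpha():
--             j = i
--             while j < n and sentence[j].isalpha():
--                 j += 1
--             w = sentence[i:j]
--             if j - i > 4:
--                 w = "".join(c for c in w if c not in vowels)
--             out.append(w)
--             i = j
--         else:
--             out.append(sentence[i])
--             i += 1
--     return "".join(out)
-- ===== Notes on version B (the rewrite author's own statement) =====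
-- stated objective: simpler
-- what changed: Replaces A's character-by-character state machine with a mutable word buffer and a flush_word closure by a run-at-a-time two-pointer scan: each maximal letter run is sliced out in one step, de-vowelled if longer than 4, and emitted, so the buffer and flush closure disappear.
import Mathlib
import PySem

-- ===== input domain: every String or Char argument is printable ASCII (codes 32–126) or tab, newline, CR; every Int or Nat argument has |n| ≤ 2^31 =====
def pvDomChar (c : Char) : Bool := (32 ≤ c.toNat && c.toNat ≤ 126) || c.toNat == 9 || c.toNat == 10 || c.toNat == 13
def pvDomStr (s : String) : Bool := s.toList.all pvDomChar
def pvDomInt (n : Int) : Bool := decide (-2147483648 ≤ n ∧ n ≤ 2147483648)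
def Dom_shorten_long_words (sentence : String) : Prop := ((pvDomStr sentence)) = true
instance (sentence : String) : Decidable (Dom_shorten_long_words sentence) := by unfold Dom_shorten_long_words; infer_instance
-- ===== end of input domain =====

-- B replaces A's per-character buffer/flush-closure state machine by a run-at-a-time
-- two-pointer scan over maximal letter runs; same return value, simpler decomposition.

-- ===== PORT A =====
-- vowels = set("aeiouAEIOU") (only membership is used)
def pvVowelsA : List Char := "aeiouAEIOU".toList

-- flush_word: process the buffered word, append to result, clear the buffer
def pvFlushA (result : List String) (word : List Char) : List String × List Char :=
  if word = [] then (result, word)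
  else
    let w := String.ofList word
    let processed :=
      if PySem.Str.len w > 4 then String.ofList (w.toList.filter (fun ch => !pvVowelsA.contains ch))
      else w
    (result ++ [processed], [])

-- the for-loop over the characters, state = (result, word)
def pvGoA : List Char → List String × List Char → List String × List Char
  | [], st => st
  | ch :: rest, (result, word) =>
    if PySem.Chars.isalpha ch then pvGoA rest (result, word ++ [ch])
    else pvGoA rest ((pvFlushA result word).1 ++ [String.ofList [ch]], [])

def shorten_long_words (sentence : String) : String :=
  let st := pvGoA sentence.toList ([], [])
  let st2 := pvFlushA st.1 st.2
  PySem.Str.join "" st2.1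

-- ===== PORT B =====
def pvVowelsB : List Char := "aeiouAEIOU".toList

-- the outer while-loop of Source B: at a letter, the inner while plus the slice s[i:j]
-- take the whole maximal letter run (takeWhile) and i jumps to j (dropWhile);
-- at a non-letter the character is emitted and i advances by one.
def pvGoB (l : List Char) : List Char :=
  match l with
  | [] => []
  | ch :: rest =>
    if PySem.Chars.isalpha ch then
      let w := ch :: rest.takeWhile PySem.Chars.isalpha
      let w' := if w.length > 4 then w.filter (fun c => !pvVowelsB.contains c) else w
      w' ++ pvGoB (rest.dropWhile PySem.Chars.isalpha)
    else ch :: pvGoB rest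
termination_by l.length
decreasing_by
  · exact Nat.lt_succ_of_le (List.length_dropWhile_le _ _)
  · simp

def shorten_long_words_alt (sentence : String) : String :=
  String.ofList (pvGoB sentence.toList)

-- ===== PRECONDITION & SPEC =====
def Spec_shorten_long_words (sentence : String) (out : String) : Prop := out = shorten_long_words_alt sentence
instance (sentence : String) (out : String) : Decidable (Spec_shorten_long_words sentence out) := by unfold Spec_shorten_long_words; infer_instance

-- ===== CLAIM (what is proved, stated in full; the proofs are below) =====
def Claim_equal_shorten_long_words : Prop := ∀ (sentence : String), Dom_shorten_long_words sentence → Spec_shorten_long_words sentence (shorten_long_words sentence)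

-- ===== LEMMAS AND PROOFS =====

-- the characters contributed by a processed run
def pvProc (w : List Char) : List Char :=
  if w.length > 4 then w.filter (fun c => !pvVowelsA.contains c) else w

def pvJoinChars (rs : List String) : List Char := (rs.map String.toList).flatten

theorem pvJoinChars_append (a b : List String) :
    pvJoinChars (a ++ b) = pvJoinChars a ++ pvJoinChars b := by
  simp [pvJoinChars]

theorem pvFlushA_chars (result : List String) (word : List Char) :
    pvJoinChars (pvFlushA result word).1 = pvJoinChars result ++ pvProc word ∧
    (pvFlushA result word).2 = [] := by
  by_cases h : word = []
  · subst h; simp [pvFlushA, pvProc, pvJoinChars]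
  · constructor
    · simp only [pvFlushA, if_neg h]
      rw [pvJoinChars_append]
      simp only [pvJoinChars, pvProc, PySem.Str.len]
      split_ifs with h4 h5 h5 <;> simp_all
    · simp [pvFlushA, if_neg h]

theorem pvGoB_run (cs : List Char) :
    pvGoB cs = pvProc (cs.takeWhile PySem.Chars.isalpha) ++ pvGoB (cs.dropWhile PySem.Chars.isalpha) := by
  cases cs with
  | nil => simp [pvGoB, pvProc]
  | cons c cs' =>
    by_cases h : PySem.Chars.isalpha c
    · conv_lhs => rw [pvGoB]
      simp [h, List.takeWhile, List.dropWhile, pvProc, pvVowelsB, pvVowelsA]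
    · conv_rhs => rw [List.takeWhile_cons_of_neg (by simpa using h), List.dropWhile_cons_of_neg (by simpa using h)]
      simp [pvProc]

theorem pvFlattenIntersperse (l : List (List Char)) :
    (List.intersperse [] l).flatten = l.flatten := by
  induction l with
  | nil => simp
  | cons a t ih =>
    cases t with
    | nil => simp
    | cons b t' =>
      have hstep : List.intersperse ([] : List Char) (a :: b :: t') = a :: [] :: List.intersperse [] (b :: t') := by
        rw [List.intersperse]
        intro hh
        exact absurd hh (by simp)
      rw [hstep]
      simp only [List.flatten_cons] at ih ⊢
      simp [ih]

-- main invariant: A's state machine, flushed at the end, produces B's run decomposition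
theorem pvMain (cs : List Char) : ∀ (res : List String) (word : List Char),
    pvJoinChars (pvFlushA (pvGoA cs (res, word)).1 (pvGoA cs (res, word)).2).1
      = pvJoinChars res ++ pvProc (word ++ cs.takeWhile PySem.Chars.isalpha)
        ++ pvGoB (cs.dropWhile PySem.Chars.isalpha) := by
  induction cs with
  | nil =>
    intro res word
    simp [pvGoA, (pvFlushA_chars res word).1, pvGoB]
  | cons c cs' ih =>
    intro res word
    by_cases h : PySem.Chars.isalpha c
    · simp only [pvGoA, h, if_pos, List.takeWhile, List.dropWhile]
      rw [ih res (word ++ [c])]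
      simp
    · simp only [pvGoA, h, if_neg, Bool.not_eq_true]
      rw [ih _ []]
      rw [List.takeWhile_cons_of_neg (by simpa using h), List.dropWhile_cons_of_neg (by simpa using h)]
      simp only [List.nil_append]
      rw [pvJoinChars_append, (pvFlushA_chars res word).1]
      have hb : pvGoB (c :: cs') = c :: pvGoB cs' := by
        conv_lhs => rw [pvGoB]
        simp [h]
      rw [hb, pvGoB_run cs']
      simp [pvJoinChars]

-- ===== VERDICT (by name: the statement is the Claim_ definition above) =====
theorem shorten_long_words_spec : Claim_equal_shorten_long_words := by
  intro s _
  unfold Spec_shorten_long_words shorten_long_words shorten_long_words_alt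
  have h := pvMain s.toList [] []
  have hjoin : (PySem.Str.join "" (pvFlushA (pvGoA s.toList ([], [])).1 (pvGoA s.toList ([], [])).2).1).toList
      = pvJoinChars (pvFlushA (pvGoA s.toList ([], [])).1 (pvGoA s.toList ([], [])).2).1 := by
    rw [PySem.Str.toList_join]
    simp only [PySem.Chars.join, List.intercalate, String.toList_empty]
    rw [pvFlattenIntersperse]
    rfl
  have : (PySem.Str.join "" (pvFlushA (pvGoA s.toList ([], [])).1 (pvGoA s.toList ([], [])).2).1).toList
      = (String.ofList (pvGoB s.toList)).toList := by
    rw [hjoin, h]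
    simp [pvJoinChars]
    rw [← pvGoB_run]
  exact String.toList_injective this
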